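-- pv_equiv track=rewrite | github.com/austinProGit/scheduler | src/schedule_inspector.py | senior_year_semesters_list_of_lists
-- ===== SOURCE A (Python) =====
-- def schedule_length(schedule):
--     return len(schedule)
--
-- def semester_type_sequence(schedule):
--     SEMESTER_TYPE_SUCCESSOR = {'Fa': 'Sp', 'Sp': 'Su', 'Su': 'Fa'}
--     sequence = None
--     previous_season = 'Su'
--     if schedule_length(schedule) > 0:
--         sequence = []
--         for semester in schedule:
--             sequence.append(SEMESTER_TYPE_SUCCESSOR[previous_season])
--             previous_season = SEMESTER_TYPE_SUCCESSOR[previous_season]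
--     return sequence
--
-- def last_semester_type(schedule):
--     semester_types = semester_type_sequence(schedule)
--     if semester_types != None:
--         return semester_types[-1]
--     else: return None
--
-- def senior_interval(schedule):
--     last_type = last_semester_type(schedule)
--     if last_type == 'Su':
--         return -3
--     if last_type == 'Sp':
--         return -2
--     if last_type == 'Fa':
--         return -1
--
-- def senior_year_semesters_list_of_lists(schedule):
--     if schedule == None or schedule == [] or schedule == [[]]:
--         return None
--     senior_semesters = []
--     index = senior_interval(schedule)
--     for i in range(index, 0):
--         senior_semesters.append(schedule[i])
--     return senior_semesters
-- ===== SOURCE B (Python) =====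
-- def senior_year_semesters_list_of_lists(schedule):
--     if schedule == None or schedule == [] or schedule == [[]]:
--         return None
--     k = (len(schedule) - 1) % 3 + 1
--     return schedule[-k:]
-- ===== Notes on version B (the rewrite author's own statement) =====
-- stated objective: simpler
-- what changed: Replaced A's four-helper pipeline (simulate the whole Fa/Sp/Su successor chain along the schedule, take its last element, map it to a negative interval, then loop over range(index,0)) by a closed form: the number of trailing semesters is (len(schedule)-1)%3+1 and the result is a single tail slice.
import Mathlib
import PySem

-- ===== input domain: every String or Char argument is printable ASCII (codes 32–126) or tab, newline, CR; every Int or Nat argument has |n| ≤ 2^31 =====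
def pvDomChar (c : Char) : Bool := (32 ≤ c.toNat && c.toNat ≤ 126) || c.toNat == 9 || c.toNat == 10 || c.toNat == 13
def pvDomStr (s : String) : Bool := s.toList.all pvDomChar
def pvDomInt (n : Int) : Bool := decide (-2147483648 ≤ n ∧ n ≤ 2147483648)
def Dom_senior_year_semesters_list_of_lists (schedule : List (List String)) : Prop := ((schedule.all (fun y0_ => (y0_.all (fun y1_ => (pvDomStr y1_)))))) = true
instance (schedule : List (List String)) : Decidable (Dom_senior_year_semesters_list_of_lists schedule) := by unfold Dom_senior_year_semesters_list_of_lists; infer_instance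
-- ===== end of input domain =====

-- B replaces A's season-sequence simulation and interval lookup by the closed form k = (len-1)%3+1 and a tail slice (objective: simpler).

-- ===== PORT A =====
def pvSchedule_length (schedule : List (List String)) : Int := schedule.length

-- SEMESTER_TYPE_SUCCESSOR[s]; the loop only ever looks up 'Fa'/'Sp'/'Su', so the
-- KeyError branch of the Python dict lookup is unreachable (default "" is never returned).
def pvSucc (s : String) : String :=
  (PySem.Dict.ofList [("Fa", "Sp"), ("Sp", "Su"), ("Su", "Fa")]).getD s ""

def pvSemester_type_sequence (schedule : List (List String)) : Option (List String) :=
  if pvSchedule_length schedule > 0 then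
    some (schedule.foldl
      (fun (st : List String × String) _ => (st.1 ++ [pvSucc st.2], pvSucc st.2))
      ([], "Su")).1
  else none

def pvLast_semester_type (schedule : List (List String)) : Option String :=
  match pvSemester_type_sequence schedule with
  | some seq => PySem.List.pyGet? seq (-1)   -- seq[-1]; seq is nonempty whenever it exists
  | none => none

def pvSenior_interval (schedule : List (List String)) : Option Int :=
  match pvLast_semester_type schedule with
  | some t => if t = "Su" then some (-3) else if t = "Sp" then some (-2)
              else if t = "Fa" then some (-1) else none
  | none => none

def senior_year_semesters_list_of_lists (schedule : List (List String)) : Option (List (List String)) :=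
  if schedule = [] ∨ schedule = [[]] then none
  else
    match pvSenior_interval schedule with
    | none => none   -- unreachable: for a nonempty schedule senior_interval always yields -1/-2/-3
    | some index =>
      some ((PySem.List.pyRange index 0 1).foldl
        (fun acc i => acc ++ [PySem.List.pyGetD schedule i []]) [])
        -- schedule[i] with -3 ≤ i ≤ -1 and |i| ≤ len: always in range, default [] unreachable

-- ===== PORT B =====
def senior_year_semesters_list_of_lists_alt (schedule : List (List String)) : Option (List (List String)) :=
  if schedule = [] ∨ schedule = [[]] then none
  else
    let k : Int := PySem.Int.mod ((schedule.length : Int) - 1) 3 + 1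
    some (PySem.List.slice schedule (some (-k)) none)

-- ===== PRECONDITION & SPEC =====
def Spec_senior_year_semesters_list_of_lists (schedule : List (List String)) (out : Option (List (List String))) : Prop := out = senior_year_semesters_list_of_lists_alt schedule
instance (schedule : List (List String)) (out : Option (List (List String))) : Decidable (Spec_senior_year_semesters_list_of_lists schedule out) := by unfold Spec_senior_year_semesters_list_of_lists; infer_instance

-- ===== CLAIM (what is proved, stated in full; the proofs are below) =====
def Claim_equal_senior_year_semesters_list_of_lists : Prop := ∀ (schedule : List (List String)), Dom_senior_year_semesters_list_of_lists schedule → Spec_senior_year_semesters_list_of_lists schedule (senior_year_semesters_list_of_lists schedule)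

-- ===== LEMMAS AND PROOFS =====

-- season after m steps starting at p
def pvRot : Nat → String → String
  | 0, p => p
  | m + 1, p => pvRot m (pvSucc p)

def pvCyc (r : Nat) : String := if r = 0 then "Su" else if r = 1 then "Fa" else "Sp"

theorem pvFold_snd (l : List (List String)) (acc : List String) (prev : String) :
    (l.foldl (fun (st : List String × String) _ => (st.1 ++ [pvSucc st.2], pvSucc st.2)) (acc, prev)).2
      = pvRot l.length prev := by
  induction l generalizing acc prev with
  | nil => rfl
  | cons a t ih => simpa [List.foldl_cons, pvRot] using ih (acc ++ [pvSucc prev]) (pvSucc prev)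

theorem pvFold_last (l : List (List String)) (acc : List String) (prev : String) (h : l ≠ []) :
    ((l.foldl (fun (st : List String × String) _ => (st.1 ++ [pvSucc st.2], pvSucc st.2)) (acc, prev)).1).getLast?
      = some ((l.foldl (fun (st : List String × String) _ => (st.1 ++ [pvSucc st.2], pvSucc st.2)) (acc, prev)).2) := by
  induction l generalizing acc prev with
  | nil => exact absurd rfl h
  | cons a t ih =>
    rcases t with _ | ⟨b, t'⟩
    · simp [List.foldl_cons]
    · exact ih (acc ++ [pvSucc prev]) (pvSucc prev) (by simp)

theorem pvRot_cyc (m : Nat) :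
    pvRot m "Su" = pvCyc (m % 3) ∧ pvRot m "Fa" = pvCyc ((m + 1) % 3) ∧ pvRot m "Sp" = pvCyc ((m + 2) % 3) := by
  induction m with
  | zero => refine ⟨rfl, rfl, rfl⟩
  | succ m ih =>
    obtain ⟨h1, h2, h3⟩ := ih
    refine ⟨?_, ?_, ?_⟩
    · show pvRot m (pvSucc "Su") = _
      simpa [pvSucc, PySem.Dict.ofList, PySem.Dict.getD] using h2
    · show pvRot m (pvSucc "Fa") = _
      have : (m + 1 + 1) % 3 = (m + 2) % 3 := by omega
      rw [this]
      simpa [pvSucc, PySem.Dict.ofList, PySem.Dict.getD] using h3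
    · show pvRot m (pvSucc "Sp") = _
      have : (m + 1 + 2) % 3 = m % 3 := by omega
      rw [this]
      simpa [pvSucc, PySem.Dict.ofList, PySem.Dict.getD] using h1

theorem pvLast_type_eq (schedule : List (List String)) (h : schedule ≠ []) :
    pvLast_semester_type schedule = some (pvCyc (schedule.length % 3)) := by
  have hn : pvSchedule_length schedule > 0 := by
    simp [pvSchedule_length]
    exact List.length_pos_of_ne_nil h
  have hseq : pvSemester_type_sequence schedule
      = some (schedule.foldl (fun (st : List String × String) _ => (st.1 ++ [pvSucc st.2], pvSucc st.2)) ([], "Su")).1 := by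
    unfold pvSemester_type_sequence
    rw [if_pos hn]
  have hlast := pvFold_last schedule [] "Su" h
  have hsnd := pvFold_snd schedule [] "Su"
  unfold pvLast_semester_type
  simp only [hseq]
  rw [PySem.List.pyGet?_neg_one, hlast, hsnd, (pvRot_cyc schedule.length).1]

-- A's loop, in map form, is the k-element tail of the schedule
theorem pvTail_loop (s : List (List String)) (k : Nat) (hk : k ≤ s.length) :
    (PySem.List.pyRange (-(k : Int)) 0 1).map (fun i => PySem.List.pyGetD s i []) = s.drop (s.length - k) := by
  induction k with
  | zero => simp [PySem.List.pyRange_one_eq_nil]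
  | succ k ih =>
    have e : (-((k + 1 : Nat) : Int)) + 1 = -((k : Nat) : Int) := by push_cast; ring
    have hcons : PySem.List.pyRange (-((k + 1 : Nat) : Int)) 0 1
        = (-((k + 1 : Nat) : Int)) :: PySem.List.pyRange (-((k : Nat) : Int)) 0 1 := by
      rw [PySem.List.pyRange_one_cons (by push_cast; omega), e]
    rw [hcons, List.map_cons, ih (by omega)]
    rw [PySem.List.pyGetD_neg_natCast s (k + 1) [] (by omega) hk]
    conv_rhs => rw [List.drop_eq_getElem_cons (by omega)]
    have h1 : s.length - k = s.length - (k + 1) + 1 := by omega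
    rw [h1]

theorem senior_year_eq (schedule : List (List String)) :
    senior_year_semesters_list_of_lists schedule = senior_year_semesters_list_of_lists_alt schedule := by
  unfold senior_year_semesters_list_of_lists senior_year_semesters_list_of_lists_alt
  by_cases hc : schedule = [] ∨ schedule = [[]]
  · rw [if_pos hc, if_pos hc]
  · rw [if_neg hc, if_neg hc]
    have hne : schedule ≠ [] := fun h => hc (Or.inl h)
    have hlen : 1 ≤ schedule.length := List.length_pos_of_ne_nil hne
    have hlast := pvLast_type_eq schedule hne
    set n := schedule.length with hn
    have hmod : PySem.Int.mod ((n : Int) - 1) 3 + 1 = (((n - 1) % 3 + 1 : Nat) : Int) := by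
      have h1 : ((n : Int) - 1) = (((n - 1 : Nat)) : Int) := by omega
      rw [h1, show ((3 : Int)) = ((3 : Nat) : Int) from rfl, PySem.Int.mod_natCast]
      push_cast
      ring
    unfold pvSenior_interval
    simp only [hlast]
    have hfold : ∀ (k : Nat), k ≤ n →
        (PySem.List.pyRange (-(k : Int)) 0 1).foldl
          (fun acc i => acc ++ [PySem.List.pyGetD schedule i []]) [] = schedule.drop (n - k) := by
      intro k hk2
      rw [PySem.List.foldl_append_singleton_eq_map]
      simpa using pvTail_loop schedule k hk2
    have h3 : n % 3 = 0 ∨ n % 3 = 1 ∨ n % 3 = 2 := by omega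
    rcases h3 with h3 | h3 | h3
    · -- last type "Su": A takes schedule[-3:], B's k is 3
      rw [h3]
      have hkB : (n - 1) % 3 + 1 = 3 := by omega
      simp only [show pvCyc 0 = "Su" from rfl, String.reduceEq, reduceIte]
      rw [hmod, hkB, PySem.List.slice_from_neg_natCast schedule 3 (by omega)]
      rw [show (-3 : Int) = -((3 : Nat) : Int) by norm_num, hfold 3 (by omega)]
    · -- last type "Fa": A takes schedule[-1:], B's k is 1
      rw [h3]
      have hkB : (n - 1) % 3 + 1 = 1 := by omega
      simp only [show pvCyc 1 = "Fa" from rfl, String.reduceEq, reduceIte]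
      rw [hmod, hkB, PySem.List.slice_from_neg_natCast schedule 1 (by omega)]
      rw [show (-1 : Int) = -((1 : Nat) : Int) by norm_num, hfold 1 (by omega)]
    · -- last type "Sp": A takes schedule[-2:], B's k is 2
      rw [h3]
      have hkB : (n - 1) % 3 + 1 = 2 := by omega
      simp only [show pvCyc 2 = "Sp" from rfl, String.reduceEq, reduceIte]
      rw [hmod, hkB, PySem.List.slice_from_neg_natCast schedule 2 (by omega)]
      rw [show (-2 : Int) = -((2 : Nat) : Int) by norm_num, hfold 2 (by omega)]

-- ===== VERDICT (by name: the statement is the Claim_ definition above) =====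
theorem senior_year_semesters_list_of_lists_spec : Claim_equal_senior_year_semesters_list_of_lists := by
  intro schedule _
  unfold Spec_senior_year_semesters_list_of_lists
  exact senior_year_eq schedule
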